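-- pv_equiv track=rewrite | github.com/MAHFOOZ-16/auto-apply-sweden | agent/tailor.py | _gen_experience_highlight
-- ===== SOURCE A (Python) =====
-- from typing import Any, Dict, List
--
-- def _gen_experience_highlight(keywords: List[str]) -> str:
--     kw_str = " ".join(keywords).lower()
--     domains = []
--     if any(k in kw_str for k in ["python", "java", "react", "node"]):
--         domains.append("full-stack development")
--     if any(k in kw_str for k in ["ml", "ai", "machine learning", "pytorch",
--                                   "tensorflow"]):
--         domains.append("AI and machine learning")
--     if any(k in kw_str for k in ["aws", "docker", "kubernetes", "terraform"]):
--         domains.append("cloud infrastructure")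
--     if any(k in kw_str for k in ["security", "owasp", "penetration",
--                                   "nmap", "siem"]):
--         domains.append("cybersecurity")
--     return ", ".join(domains) if domains else "software engineering and AI"
-- ===== SOURCE B (Python) =====
-- from typing import List
--
-- _PATTERNS = [
--     ("python", 0), ("java", 0), ("react", 0), ("node", 0),
--     ("ml", 1), ("ai", 1), ("machine learning", 1), ("pytorch", 1), ("tensorflow", 1),
--     ("aws", 2), ("docker", 2), ("kubernetes", 2), ("terraform", 2),
--     ("security", 3), ("owasp", 3), ("penetration", 3), ("nmap", 3), ("siem", 3),
-- ]
--
-- _LABELS = ["full-stack development", "AI and machine learning",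
--            "cloud infrastructure", "cybersecurity"]
--
-- def _gen_experience_highlight(keywords: List[str]) -> str:
--     text = " ".join(keywords).lower()
--     hit = [False, False, False, False]
--     for i in range(len(text)):
--         for pat, d in _PATTERNS:
--             if text.startswith(pat, i):
--                 hit[d] = True
--     labels = [lab for d, lab in enumerate(_LABELS) if hit[d]]
--     return ", ".join(labels) if labels else "software engineering and AI"
-- ===== Notes on version B (the rewrite author's own statement) =====
-- stated objective: alternative
-- what changed: B replaces the four per-rule substring-membership tests ('k in kw_str') with a single left-to-right scan over the text positions, a naive multi-pattern matcher that marks a hit-flag per domain whenever any pattern starts at the current position, then emits the labels of the set flags.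
import Mathlib
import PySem

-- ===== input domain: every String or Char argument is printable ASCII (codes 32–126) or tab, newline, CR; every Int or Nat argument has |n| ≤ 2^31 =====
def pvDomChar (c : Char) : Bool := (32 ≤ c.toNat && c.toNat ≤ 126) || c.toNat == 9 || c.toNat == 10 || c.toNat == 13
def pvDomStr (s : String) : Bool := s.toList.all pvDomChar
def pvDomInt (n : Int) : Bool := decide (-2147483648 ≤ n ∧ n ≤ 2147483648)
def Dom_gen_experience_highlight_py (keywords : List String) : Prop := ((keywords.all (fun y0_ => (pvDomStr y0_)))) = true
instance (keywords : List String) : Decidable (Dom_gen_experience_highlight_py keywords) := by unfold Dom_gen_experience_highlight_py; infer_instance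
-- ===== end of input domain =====

-- B replaces the per-rule substring-membership tests with a single position scan (naive multi-pattern matcher) setting one hit-flag per domain (alternative; same output).
-- ===== PORT A =====
def gen_experience_highlight_py (keywords : List String) : String :=
  let kw_str := PySem.Str.lower (PySem.Str.join " " keywords)
  let domains : List String := []
  let domains := if ["python", "java", "react", "node"].any (fun k => PySem.Str.isIn k kw_str)
    then domains ++ ["full-stack development"] else domains
  let domains := if ["ml", "ai", "machine learning", "pytorch", "tensorflow"].any (fun k => PySem.Str.isIn k kw_str)
    then domains ++ ["AI and machine learning"] else domains
  let domains := if ["aws", "docker", "kubernetes", "terraform"].any (fun k => PySem.Str.isIn k kw_str)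
    then domains ++ ["cloud infrastructure"] else domains
  let domains := if ["security", "owasp", "penetration", "nmap", "siem"].any (fun k => PySem.Str.isIn k kw_str)
    then domains ++ ["cybersecurity"] else domains
  if domains.isEmpty then "software engineering and AI" else PySem.Str.join ", " domains

-- ===== PORT B =====
def pvPatterns : List (String × Nat) :=
  [ ("python", 0), ("java", 0), ("react", 0), ("node", 0),
    ("ml", 1), ("ai", 1), ("machine learning", 1), ("pytorch", 1), ("tensorflow", 1),
    ("aws", 2), ("docker", 2), ("kubernetes", 2), ("terraform", 2),
    ("security", 3), ("owasp", 3), ("penetration", 3), ("nmap", 3), ("siem", 3) ]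

def pvLabels : List String :=
  ["full-stack development", "AI and machine learning", "cloud infrastructure", "cybersecurity"]

-- hit[d] = True  (the four-element Python list of flags, as a 4-tuple)
def pvSetHit (h : Bool × Bool × Bool × Bool) (d : Nat) : Bool × Bool × Bool × Bool :=
  match d with
  | 0 => (true, h.2.1, h.2.2.1, h.2.2.2)
  | 1 => (h.1, true, h.2.2.1, h.2.2.2)
  | 2 => (h.1, h.2.1, true, h.2.2.2)
  | 3 => (h.1, h.2.1, h.2.2.1, true)
  | _ => h

def pvHitIdx (h : Bool × Bool × Bool × Bool) (d : Int) : Bool :=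
  if d = 0 then h.1 else if d = 1 then h.2.1 else if d = 2 then h.2.2.1
  else if d = 3 then h.2.2.2 else false

def gen_experience_highlight_py_alt (keywords : List String) : String :=
  -- Python's text.startswith(pat, i) with 0 ≤ i ≤ len(text) is exactly startswith of text[i:] — ported as startswith on (t.drop i)
  let t := (PySem.Str.lower (PySem.Str.join " " keywords)).toList
  let hit : Bool × Bool × Bool × Bool := (false, false, false, false)
  let hit := (List.range t.length).foldl
    (fun h i => pvPatterns.foldl
      (fun h pd => if PySem.Chars.startswith (t.drop i) pd.1.toList then pvSetHit h pd.2 else h) h) hit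
  let labels := ((PySem.List.enumerate pvLabels).filter (fun dl => pvHitIdx hit dl.1)).map (fun dl => dl.2)
  if labels.isEmpty then "software engineering and AI" else PySem.Str.join ", " labels

-- ===== PRECONDITION & SPEC =====
def Spec_gen_experience_highlight_py (keywords : List String) (out : String) : Prop := out = gen_experience_highlight_py_alt keywords
instance (keywords : List String) (out : String) : Decidable (Spec_gen_experience_highlight_py keywords out) := by unfold Spec_gen_experience_highlight_py; infer_instance

-- ===== CLAIM (what is proved, stated in full; the proofs are below) =====
def Claim_equal_gen_experience_highlight_py : Prop := ∀ (keywords : List String), Dom_gen_experience_highlight_py keywords → Spec_gen_experience_highlight_py keywords (gen_experience_highlight_py keywords)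

-- ===== LEMMAS AND PROOFS =====

theorem pvSetHit_eq (h : Bool × Bool × Bool × Bool) (d : Nat) :
    pvSetHit h d = (h.1 || (d == 0), h.2.1 || (d == 1),
                    h.2.2.1 || (d == 2), h.2.2.2 || (d == 3)) := by
  obtain ⟨a, b, c, e⟩ := h
  rcases d with _ | _ | _ | _ | d <;> simp [pvSetHit]

theorem pv_inner (l : List (String × Nat)) (c : String × Nat → Bool) (h : Bool × Bool × Bool × Bool) :
    l.foldl (fun h pd => if c pd then pvSetHit h pd.2 else h) h
    = (h.1 || l.any (fun pd => c pd && pd.2 == 0),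
       h.2.1 || l.any (fun pd => c pd && pd.2 == 1),
       h.2.2.1 || l.any (fun pd => c pd && pd.2 == 2),
       h.2.2.2 || l.any (fun pd => c pd && pd.2 == 3)) := by
  induction l generalizing h with
  | nil => simp
  | cons x xs ih =>
    simp only [List.foldl_cons, List.any_cons]
    cases c x
    · simp [ih]
    · rw [if_pos rfl, ih, pvSetHit_eq]
      simp [Bool.or_assoc]

theorem pv_outer (l : List Nat) (g0 g1 g2 g3 : Nat → Bool) (h : Bool × Bool × Bool × Bool) :
    l.foldl (fun h i => (h.1 || g0 i, h.2.1 || g1 i, h.2.2.1 || g2 i, h.2.2.2 || g3 i)) h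
    = (h.1 || l.any g0, h.2.1 || l.any g1, h.2.2.1 || l.any g2, h.2.2.2 || l.any g3) := by
  induction l generalizing h with
  | nil => simp
  | cons x xs ih => simp [ih, Bool.or_assoc]

theorem pv_any_or {α : Type} (l : List α) (f g : α → Bool) :
    l.any (fun x => f x || g x) = (l.any f || l.any g) := by
  induction l with
  | nil => simp
  | cons x xs ih => cases hf : f x <;> cases hg : g x <;> simp [ih, hf, hg]

-- a nonempty pattern occurs as a substring iff it starts at some position of the text
theorem pv_occ (t p : List Char) (hp : p ≠ []) :
    (List.range t.length).any (fun i => PySem.Chars.startswith (t.drop i) p)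
    = PySem.Chars.isIn p t := by
  rcases hb : PySem.Chars.isIn p t with _ | _
  · rw [List.any_eq_false]
    intro i _ hs
    have : PySem.Chars.isIn p t = true :=
      (PySem.Chars.exists_prefix_drop_iff_isIn p t).mp
        ⟨i, (PySem.Chars.startswith_iff _ _).mp hs⟩
    rw [hb] at this; exact Bool.false_ne_true this
  · rw [List.any_eq_true]
    obtain ⟨j, hj⟩ := (PySem.Chars.exists_prefix_drop_iff_isIn p t).mpr hb
    by_cases hlt : j < t.length
    · exact ⟨j, List.mem_range.mpr hlt, (PySem.Chars.startswith_iff _ _).mpr hj⟩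
    · exfalso
      have hnil : t.drop j = [] := List.drop_eq_nil_of_le (le_of_not_gt hlt)
      rw [hnil] at hj
      exact hp (List.prefix_nil.mp hj)

-- B's scan produces one hit-flag per domain; each flag equals "some pattern of that domain occurs in t"
theorem pv_alt_hit (t : List Char) :
    (List.range t.length).foldl
      (fun h i => pvPatterns.foldl
        (fun h pd => if PySem.Chars.startswith (t.drop i) pd.1.toList then pvSetHit h pd.2 else h) h)
      (false, false, false, false)
    = (PySem.Chars.isIn "python".toList t || (PySem.Chars.isIn "java".toList t ||
         (PySem.Chars.isIn "react".toList t || PySem.Chars.isIn "node".toList t)),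
       PySem.Chars.isIn "ml".toList t || (PySem.Chars.isIn "ai".toList t ||
         (PySem.Chars.isIn "machine learning".toList t || (PySem.Chars.isIn "pytorch".toList t ||
         PySem.Chars.isIn "tensorflow".toList t))),
       PySem.Chars.isIn "aws".toList t || (PySem.Chars.isIn "docker".toList t ||
         (PySem.Chars.isIn "kubernetes".toList t || PySem.Chars.isIn "terraform".toList t)),
       PySem.Chars.isIn "security".toList t || (PySem.Chars.isIn "owasp".toList t ||
         (PySem.Chars.isIn "penetration".toList t || (PySem.Chars.isIn "nmap".toList t ||
         PySem.Chars.isIn "siem".toList t)))) := by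
  have hstep : (fun (h : Bool × Bool × Bool × Bool) (i : Nat) => pvPatterns.foldl
        (fun h pd => if PySem.Chars.startswith (t.drop i) pd.1.toList then pvSetHit h pd.2 else h) h)
      = fun h i =>
        (h.1 || (fun i => pvPatterns.any (fun pd => PySem.Chars.startswith (t.drop i) pd.1.toList && pd.2 == 0)) i,
         h.2.1 || (fun i => pvPatterns.any (fun pd => PySem.Chars.startswith (t.drop i) pd.1.toList && pd.2 == 1)) i,
         h.2.2.1 || (fun i => pvPatterns.any (fun pd => PySem.Chars.startswith (t.drop i) pd.1.toList && pd.2 == 2)) i,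
         h.2.2.2 || (fun i => pvPatterns.any (fun pd => PySem.Chars.startswith (t.drop i) pd.1.toList && pd.2 == 3)) i) :=
    funext fun h => funext fun i => pv_inner pvPatterns _ h
  rw [hstep, pv_outer (List.range t.length)
    (fun i => pvPatterns.any (fun pd => PySem.Chars.startswith (t.drop i) pd.1.toList && pd.2 == 0))
    (fun i => pvPatterns.any (fun pd => PySem.Chars.startswith (t.drop i) pd.1.toList && pd.2 == 1))
    (fun i => pvPatterns.any (fun pd => PySem.Chars.startswith (t.drop i) pd.1.toList && pd.2 == 2))
    (fun i => pvPatterns.any (fun pd => PySem.Chars.startswith (t.drop i) pd.1.toList && pd.2 == 3))]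
  simp only [pvPatterns, List.any_cons, List.any_nil, Bool.or_false, Bool.false_or,
    Nat.reduceBEq, Bool.and_true, Bool.and_false, beq_self_eq_true]
  simp only [pv_any_or]
  rw [pv_occ t "python".toList (by decide), pv_occ t "java".toList (by decide),
      pv_occ t "react".toList (by decide), pv_occ t "node".toList (by decide),
      pv_occ t "ml".toList (by decide), pv_occ t "ai".toList (by decide),
      pv_occ t "machine learning".toList (by decide), pv_occ t "pytorch".toList (by decide),
      pv_occ t "tensorflow".toList (by decide), pv_occ t "aws".toList (by decide),
      pv_occ t "docker".toList (by decide), pv_occ t "kubernetes".toList (by decide),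
      pv_occ t "terraform".toList (by decide), pv_occ t "security".toList (by decide),
      pv_occ t "owasp".toList (by decide), pv_occ t "penetration".toList (by decide),
      pv_occ t "nmap".toList (by decide), pv_occ t "siem".toList (by decide)]

-- ===== VERDICT (by name: the statement is the Claim_ definition above) =====
theorem gen_experience_highlight_py_spec : Claim_equal_gen_experience_highlight_py := by
  intro keywords _
  unfold Spec_gen_experience_highlight_py gen_experience_highlight_py gen_experience_highlight_py_alt
  simp only [PySem.Str.isIn_eq, List.any_cons, List.any_nil, Bool.or_false]
  generalize (PySem.Str.lower (PySem.Str.join " " keywords)).toList = t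
  rw [pv_alt_hit t]
  generalize (PySem.Chars.isIn "python".toList t || (PySem.Chars.isIn "java".toList t ||
    (PySem.Chars.isIn "react".toList t || PySem.Chars.isIn "node".toList t))) = b1
  generalize (PySem.Chars.isIn "ml".toList t || (PySem.Chars.isIn "ai".toList t ||
    (PySem.Chars.isIn "machine learning".toList t || (PySem.Chars.isIn "pytorch".toList t ||
    PySem.Chars.isIn "tensorflow".toList t)))) = b2
  generalize (PySem.Chars.isIn "aws".toList t || (PySem.Chars.isIn "docker".toList t ||
    (PySem.Chars.isIn "kubernetes".toList t || PySem.Chars.isIn "terraform".toList t))) = b3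
  generalize (PySem.Chars.isIn "security".toList t || (PySem.Chars.isIn "owasp".toList t ||
    (PySem.Chars.isIn "penetration".toList t || (PySem.Chars.isIn "nmap".toList t ||
    PySem.Chars.isIn "siem".toList t)))) = b4
  cases b1 <;> cases b2 <;> cases b3 <;> cases b4 <;>
    simp [pvLabels, pvHitIdx, PySem.List.enumerate]
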